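-- pv_equiv track=rewrite | github.com/expbox77/algo-study | code/[PGS]소수 찾기-Lv.1.py | solution
-- ===== SOURCE A (Python) =====
-- def solution(n):
--     temp = [False, False,] + [True] * (n - 1)
--     prime = 0
--
--     for i in range(2, n + 1):
--         if temp[i]:
--             # temp 리스트에서 True값을 가진 인덱스가 소수이니까 바로 prime 변수에 1을 더해서 len()하는 시간까지도 아낄 수 있도록.
--             prime += 1
--             for j in range(2 * i, n + 1, i):
--                 temp[j] = False
--
--     return prime
-- ===== SOURCE B (Python) =====
-- def solution(n):
--     def is_prime(k):
--         d = 2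
--         while d * d <= k:
--             if k % d == 0:
--                 return False
--             d += 1
--         return k >= 2
--     return sum(1 for k in range(2, n + 1) if is_prime(k))
-- ===== Notes on version B (the rewrite author's own statement) =====
-- stated objective: alternative
-- what changed: B counts primes by an independent per-number trial-division primality test (checking divisors d with d*d <= k for each k) instead of A's shared mutable Sieve-of-Eratosthenes array with composite marking; no array is maintained at all.
import Mathlib
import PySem

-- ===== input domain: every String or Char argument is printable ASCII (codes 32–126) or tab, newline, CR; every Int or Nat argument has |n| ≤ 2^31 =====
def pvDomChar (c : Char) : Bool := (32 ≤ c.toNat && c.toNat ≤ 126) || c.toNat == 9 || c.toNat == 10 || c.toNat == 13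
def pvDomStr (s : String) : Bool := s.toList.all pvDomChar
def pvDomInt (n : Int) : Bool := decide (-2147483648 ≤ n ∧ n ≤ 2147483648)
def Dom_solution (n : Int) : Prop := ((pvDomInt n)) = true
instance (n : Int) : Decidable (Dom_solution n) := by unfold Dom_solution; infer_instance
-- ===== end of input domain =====

-- B counts primes by an independent per-number trial-division primality test instead of A's
-- shared mutable sieve array — a different algorithm of the same exact behaviour (not faster).

-- ===== PORT A =====
-- A: temp = [False, False] + [True]*(n-1); for i in 2..n: if temp[i]: prime += 1; mark 2i, 3i, … ≤ n.
-- Python's mutable list of booleans is ported as Array Bool ([True]*(n-1) is empty for n < 1,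
-- exactly like Array.replicate (n-1).toNat). Every index the code reads or writes satisfies
-- 0 ≤ i ≤ n < size, where Array getD / setIfInBounds agree with Python list indexing exactly.
def solution (n : Int) : Int :=
  let temp0 : Array Bool := #[false, false] ++ Array.replicate (n - 1).toNat true
  ((PySem.List.pyRange 2 (n + 1) 1).foldl
    (fun (st : Array Bool × Int) i =>
      if st.1.getD i.toNat false then
        ((PySem.List.pyRange (2 * i) (n + 1) i).foldl
            (fun t j => t.setIfInBounds j.toNat false) st.1,
         st.2 + 1)
      else st)
    (temp0, 0)).2

-- ===== PORT B =====
-- is_prime's 'while d*d <= k' loop: early 'return False' when k % d == 0 (k % d for positive d is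
-- PySem.Int.mod), otherwise d += 1; after the loop 'return k >= 2'.
def tdLoop (k d : Int) : Bool :=
  if _h : d * d ≤ k then
    if PySem.Int.mod k d == 0 then false else tdLoop k (d + 1)
  else decide (2 ≤ k)
termination_by (k + 1 - d).toNat
decreasing_by
  have hdk : d ≤ k := by
    by_cases h : d ≤ 0
    · nlinarith [mul_self_nonneg d]
    · push Not at h; nlinarith
  omega

-- sum(1 for k in range(2, n+1) if is_prime(k)) as a fold over the same range
def solution_alt (n : Int) : Int :=
  (PySem.List.pyRange 2 (n + 1) 1).foldl
    (fun acc k => if tdLoop k 2 then acc + 1 else acc) 0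

-- ===== PRECONDITION & SPEC =====
def Spec_solution (n : Int) (out : Int) : Prop := out = solution_alt n
instance (n : Int) (out : Int) : Decidable (Spec_solution n out) := by unfold Spec_solution; infer_instance

-- ===== CLAIM (what is proved, stated in full; the proofs are below) =====
def Claim_equal_solution : Prop := ∀ (n : Int), Dom_solution n → Spec_solution n (solution n)

-- ===== LEMMAS AND PROOFS =====
def goodA (m : Int) (k : Nat) : Prop :=
  2 ≤ k ∧ ∀ p : Nat, Nat.Prime p → (p : Int) < m → ¬(p ∣ k ∧ p ≠ k)
def chkA (m : Int) (k : Nat) : Bool :=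
  decide (2 ≤ k) &&
    !((List.range (k + 1)).any fun p =>
        decide (Nat.Prime p) && decide ((p : Int) < m) && decide (p ∣ k) && decide (p ≠ k))

lemma chkA_iff (m : Int) (k : Nat) : chkA m k = true ↔ goodA m k := by
  simp only [chkA, goodA, Bool.and_eq_true, decide_eq_true_eq, Bool.not_eq_true',
    List.any_eq_false, List.mem_range]
  constructor
  · rintro ⟨h2, hall⟩
    refine ⟨h2, ?_⟩
    intro p hp hpm ⟨hdvd, hne⟩
    have hpk : p ≤ k := Nat.le_of_dvd (by omega) hdvd
    have := hall p (by omega)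
    simp [hp, hpm, hdvd, hne] at this
  · rintro ⟨h2, hall⟩
    refine ⟨h2, ?_⟩
    intro p _
    by_cases hp : Nat.Prime p
    · by_cases hpm : (p : Int) < m
      · by_cases hdvd : p ∣ k
        · have := hall p hp hpm
          simp [hp, hpm, hdvd]
          by_contra hne'
          exact this ⟨hdvd, hne'⟩
        · simp [hdvd]
      · simp [hpm]
    · simp [hp]

lemma mark_length (js : List Int) (t : List Bool) :
    (js.foldl (fun t j => PySem.List.pySetD t j false) t).length = t.length := by
  induction js generalizing t with
  | nil => rfl
  | cons j js ih => simp [List.foldl_cons, ih, PySem.List.length_pySetD]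

lemma mark_getD (js : List Int) : ∀ (t : List Bool),
    (∀ j ∈ js, 0 ≤ j ∧ j < (t.length : Int)) → ∀ k : Nat, k < t.length →
    (js.foldl (fun t j => PySem.List.pySetD t j false) t).getD k false
      = (t.getD k false && !(decide ((k : Int) ∈ js))) := by
  induction js with
  | nil => intro t _ k hk; simp
  | cons j js ih =>
    intro t hjs k hk
    obtain ⟨hj0, hjl⟩ := hjs j (List.mem_cons_self)
    have hset := PySem.List.pySetD_natCast t j.toNat false
    rw [show ((j.toNat : Nat) : Int) = j by omega] at hset
    rw [List.foldl_cons, hset, ih _ (by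
      intro x hx
      have := hjs x (List.mem_cons_of_mem _ hx)
      simpa [List.length_set] using this) k (by simpa using hk)]
    by_cases hkj : (k : Int) = j
    · have : j.toNat = k := by omega
      simp [this, List.getD_eq_getElem?_getD, hk, hkj]
    · have hne : j.toNat ≠ k := by omega
      simp [List.getD_eq_getElem?_getD, hne, hkj]

lemma chkA_self (M : Nat) (h2 : 2 ≤ M) : chkA (M : Int) M = decide (Nat.Prime M) := by
  by_cases hP : Nat.Prime M
  · simp only [hP, decide_true]
    rw [chkA_iff]
    refine ⟨h2, ?_⟩
    intro p hp hpm ⟨hdvd, hne⟩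
    rcases (Nat.Prime.eq_one_or_self_of_dvd hP p hdvd) with h1 | h1
    · exact Nat.Prime.one_lt hp |>.ne' h1
    · exact hne h1
  · simp only [hP, decide_false]
    rw [← Bool.not_eq_true, chkA_iff]
    intro ⟨_, hall⟩
    have hpf : Nat.Prime (Nat.minFac M) := Nat.minFac_prime (by omega)
    have hdvd : Nat.minFac M ∣ M := Nat.minFac_dvd M
    have hne : Nat.minFac M ≠ M := fun he => hP (he ▸ hpf)
    have hlt : Nat.minFac M < M := Nat.lt_of_le_of_ne (Nat.le_of_dvd (by omega) hdvd) hne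
    exact hall (Nat.minFac M) hpf (by exact_mod_cast hlt) ⟨hdvd, hne⟩

def countA (M : Nat) : Int := ((List.range M).countP (fun k => decide (Nat.Prime k)) : Int)

lemma countA_succ (M : Nat) :
    countA (M + 1) = countA M + if Nat.Prime M then 1 else 0 := by
  unfold countA
  rw [List.range_succ, List.countP_append]
  by_cases h : Nat.Prime M <;> simp [h]

lemma arr_getD (t : List Bool) (k : Nat) : t.toArray.getD k false = t.getD k false := by
  by_cases h : k < t.length
  · simp [Array.getD, List.getD_eq_getElem?_getD, h]
  · simp [Array.getD, List.getD_eq_getElem?_getD, h]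

lemma mark_arr (js : List Int) : ∀ (t : List Bool),
    (∀ j ∈ js, 0 ≤ j ∧ j < (t.length : Int)) →
    js.foldl (fun a j => a.setIfInBounds j.toNat false) t.toArray
      = (js.foldl (fun t j => PySem.List.pySetD t j false) t).toArray := by
  induction js with
  | nil => intro t _; rfl
  | cons j js ih =>
    intro t hjs
    obtain ⟨hj0, hjl⟩ := hjs j List.mem_cons_self
    have hset := PySem.List.pySetD_natCast t j.toNat false
    rw [show ((j.toNat : Nat) : Int) = j by omega] at hset
    rw [List.foldl_cons, List.foldl_cons, List.setIfInBounds_toArray, hset]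
    exact ih _ (by
      intro x hx
      have := hjs x (List.mem_cons_of_mem _ hx)
      simpa [List.length_set] using this)

def tempA (n m : Int) : List Bool := (List.range (n + 1).toNat).map (fun k => chkA m k)

lemma tempA_getD (n m : Int) (k : Nat) (hk : k < (n + 1).toNat) :
    (tempA n m).getD k false = chkA m k := by
  simp [tempA, List.getD_eq_getElem?_getD, hk]

lemma goodA_succ (M k : Nat) (hp : Nat.Prime M) :
    goodA ((M : Int) + 1) k ↔ goodA M k ∧ ¬(M ∣ k ∧ M ≠ k) := by
  unfold goodA
  constructor
  · rintro ⟨h2, hall⟩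
    refine ⟨⟨h2, fun p pp hpm => hall p pp (by omega)⟩, hall M hp (by omega)⟩
  · rintro ⟨⟨h2, hall⟩, hM⟩
    refine ⟨h2, fun p pp hpm => ?_⟩
    by_cases hpM : p = M
    · subst hpM; exact hM
    · exact hall p pp (by omega)

lemma goodA_succ_notprime (M k : Nat) (hp : ¬ Nat.Prime M) :
    goodA ((M : Int) + 1) k ↔ goodA M k := by
  unfold goodA
  constructor
  · rintro ⟨h2, hall⟩
    exact ⟨h2, fun p pp hpm => hall p pp (by omega)⟩
  · rintro ⟨h2, hall⟩
    refine ⟨h2, fun p pp hpm => ?_⟩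
    by_cases hpM : p = M
    · exact absurd (hpM ▸ pp) hp
    · exact hall p pp (by omega)

lemma tempA_succ_notprime (n : Int) (M : Nat) (hM : ¬ Nat.Prime M) :
    tempA n ((M : Int) + 1) = tempA n M := by
  unfold tempA
  apply List.map_congr_left
  intro k _
  rw [Bool.eq_iff_iff, chkA_iff, chkA_iff]
  exact goodA_succ_notprime M k hM

lemma dvd_shift (a b c : Int) (h : a ∣ c) : (a ∣ b - c) ↔ a ∣ b :=
  ⟨fun h3 => by simpa using dvd_add h3 h, fun hb => dvd_sub hb h⟩

lemma memA_iff (n : Int) (M k : Nat) (h2 : 2 ≤ M) (hkn : (k : Int) ≤ n) :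
    ((k : Int) ∈ PySem.List.pyRange (2 * (M : Int)) (n + 1) (M : Int)) ↔ (2 * M ≤ k ∧ M ∣ k) := by
  rw [PySem.List.mem_pyRange_iff_of_pos (by omega)]
  constructor
  · rintro ⟨h1, _, h3⟩
    have hdvd : (M : Int) ∣ (k : Int) := (dvd_shift _ _ _ ⟨2, by ring⟩).mp h3
    exact ⟨by omega, by exact_mod_cast hdvd⟩
  · rintro ⟨h1, h2d⟩
    have hdvd : (M : Int) ∣ (k : Int) := by exact_mod_cast h2d
    exact ⟨by omega, by omega, (dvd_shift _ _ _ ⟨2, by ring⟩).mpr hdvd⟩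

lemma tempA_succ_prime (n : Int) (hn : 2 ≤ n) (M : Nat) (h2 : 2 ≤ M) (hMn : (M : Int) ≤ n)
    (hp : Nat.Prime M) :
    (PySem.List.pyRange (2 * (M : Int)) (n + 1) (M : Int)).foldl
      (fun t j => PySem.List.pySetD t j false) (tempA n M) = tempA n ((M : Int) + 1) := by
  have hlen : (tempA n M).length = (n + 1).toNat := by simp [tempA]
  have hjs : ∀ j ∈ PySem.List.pyRange (2 * (M : Int)) (n + 1) (M : Int),
      0 ≤ j ∧ j < ((tempA n M).length : Int) := by
    intro j hj
    rw [PySem.List.mem_pyRange_iff_of_pos (by omega)] at hj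
    rw [hlen]
    omega
  apply List.ext_getElem
  · rw [mark_length, hlen]; simp [tempA]
  intro k hk1 hk2
  have hkN : k < (n + 1).toNat := by rw [mark_length, hlen] at hk1; exact hk1
  rw [← List.getD_eq_getElem _ false hk1, ← List.getD_eq_getElem _ false hk2,
    mark_getD _ _ hjs k (by omega), tempA_getD n _ k hkN, tempA_getD n _ k hkN,
    Bool.eq_iff_iff]
  simp only [Bool.and_eq_true, Bool.not_eq_true', decide_eq_false_iff_not, chkA_iff]
  rw [goodA_succ M k hp, memA_iff n M k h2 (by omega)]
  constructor
  · rintro ⟨g, h⟩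
    refine ⟨g, ?_⟩
    rintro ⟨hdvd, hne⟩
    apply h
    obtain ⟨q, rfl⟩ := hdvd
    have h2k := g.1
    refine ⟨?_, ⟨q, rfl⟩⟩
    match q with
    | 0 => omega
    | 1 => omega
    | (q + 2) => nlinarith
  · rintro ⟨g, h⟩
    refine ⟨g, ?_⟩
    rintro ⟨h1, hdvd⟩
    exact h ⟨hdvd, by omega⟩

lemma tempA_init (n : Int) (hn : 2 ≤ n) :
    ([false, false] ++ List.replicate (n - 1).toNat true) = tempA n 2 := by
  apply List.ext_getElem
  · simp [tempA]; omega
  intro k hk1 hk2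
  have hkN : k < (n + 1).toNat := by simpa [tempA] using hk2
  have hRHS : (tempA n 2)[k] = chkA 2 k := by
    simp [tempA]
  rw [hRHS]
  match k with
  | 0 => simp [chkA]
  | 1 => simp [chkA]
  | (k + 2) =>
    have hL : ([false, false] ++ List.replicate (n - 1).toNat true)[k + 2] = true := by
      rw [List.getElem_append_right (by simp)]
      simp
    rw [hL, Eq.comm, chkA_iff]
    refine ⟨by omega, ?_⟩
    intro p pp hpm _
    have := pp.two_le
    omega

lemma tempA_length (n m : Int) : (tempA n m).length = (n + 1).toNat := by
  simp [tempA]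

lemma inrangeA (n : Int) (hn : 2 ≤ n) (M : Nat) (h2 : 2 ≤ M) :
    ∀ j ∈ PySem.List.pyRange (2 * (M : Int)) (n + 1) (M : Int),
      0 ≤ j ∧ j < ((tempA n M).length : Int) := by
  intro j hj
  rw [PySem.List.mem_pyRange_iff_of_pos (by omega)] at hj
  rw [tempA_length]
  omega

lemma foldA (n : Int) (hn : 2 ≤ n) : ∀ (d : Nat), (2 : Int) + d ≤ n + 1 →
    (PySem.List.pyRange 2 (2 + (d : Int)) 1).foldl
      (fun (st : Array Bool × Int) i =>
        if st.1.getD i.toNat false then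
          ((PySem.List.pyRange (2 * i) (n + 1) i).foldl
              (fun t j => t.setIfInBounds j.toNat false) st.1,
           st.2 + 1)
        else st)
      ((tempA n 2).toArray, 0)
    = ((tempA n (2 + (d : Int))).toArray, countA (2 + d)) := by
  intro d
  induction d with
  | zero =>
    intro _
    rw [PySem.List.pyRange_one_eq_nil (by norm_num), List.foldl_nil]
    simp only [Nat.cast_zero, add_zero]
    rw [show countA 2 = 0 by unfold countA; decide]
  | succ d ih =>
    intro hd
    have hd' : (2 : Int) + d ≤ n + 1 := by push_cast at hd ⊢; omega
    have hc : ((d + 1 : Nat) : Int) = (d : Int) + 1 := by push_cast; ring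
    rw [hc, show (2 : Int) + ((d : Int) + 1) = (2 + (d : Int)) + 1 by ring,
      PySem.List.pyRange_one_succ_right (by omega), List.foldl_append, ih hd',
      List.foldl_cons, List.foldl_nil]
    have hM : ((2 + d : Nat) : Int) = 2 + (d : Int) := by push_cast; ring
    have hMn : ((2 + d : Nat) : Int) ≤ n := by push_cast at hd ⊢; omega
    have hkN : (2 + d : Nat) < (n + 1).toNat := by omega
    rw [← hM, Int.toNat_natCast, arr_getD, tempA_getD n _ _ hkN, chkA_self _ (by omega)]
    by_cases hP : Nat.Prime (2 + d)
    · rw [if_pos (by simp [hP])]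
      rw [mark_arr _ _ (inrangeA n hn (2 + d) (by omega)),
        tempA_succ_prime n hn (2 + d) (by omega) hMn hP]
      have : countA (2 + (d + 1)) = countA (2 + d) + 1 := by
        rw [show 2 + (d + 1) = (2 + d) + 1 by ring, countA_succ, if_pos hP]
      rw [this, hM]
    · rw [if_neg (by simp [hP])]
      have h1 : tempA n (((2 + d : Nat) : Int) + 1) = tempA n ((2 + d : Nat) : Int) :=
        tempA_succ_notprime n (2 + d) hP
      have h2 : countA (2 + (d + 1)) = countA (2 + d) := by
        rw [show 2 + (d + 1) = (2 + d) + 1 by ring, countA_succ, if_neg hP]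
        ring
      rw [h2]
      exact congrArg (fun t => (t.toArray, countA (2 + d))) h1.symm

lemma solution_eq (n : Int) (hn : 2 ≤ n) : solution n = countA (n + 1).toNat := by
  simp only [solution]
  have hinit : (#[false, false] ++ Array.replicate (n - 1).toNat true : Array Bool)
      = (tempA n 2).toArray := by
    rw [← List.toArray_replicate]
    rw [show (#[false, false] : Array Bool) = ([false, false] : List Bool).toArray from rfl,
      List.append_toArray]
    exact congrArg List.toArray (tempA_init n hn)
  rw [hinit]
  conv_lhs =>
    rw [show (PySem.List.pyRange 2 (n + 1) 1) =
      (PySem.List.pyRange 2 (2 + (((n - 1).toNat : Nat) : Int)) 1) from by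
        congr 1
        omega]
  rw [foldA n hn (n - 1).toNat (by omega)]
  rw [show 2 + (n - 1).toNat = (n + 1).toNat by omega]

-- ===== B-side lemmas =====
lemma tdLoop_iff : ∀ (fuel : Nat) (k d : Int), 2 ≤ d → (k + 1 - d).toNat ≤ fuel →
    (tdLoop k d = true ↔ (2 ≤ k ∧ ∀ e : Int, d ≤ e → e * e ≤ k → ¬ e ∣ k)) := by
  intro fuel
  induction fuel with
  | zero =>
    intro k d h2 hfuel
    have hkd : k < d := by omega
    have hdd : ¬ (d * d ≤ k) := by nlinarith
    rw [tdLoop, dif_neg hdd]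
    simp only [decide_eq_true_eq]
    constructor
    · intro hk
      refine ⟨hk, ?_⟩
      intro e he hee
      exfalso
      nlinarith
    · rintro ⟨hk, _⟩; exact hk
  | succ fuel ih =>
    intro k d h2 hfuel
    by_cases hdd : d * d ≤ k
    · have hdk : d < k := by nlinarith
      rw [tdLoop, dif_pos hdd]
      by_cases hdvd : d ∣ k
      · rw [if_pos (by simp [PySem.Int.mod_eq_zero_iff_dvd, hdvd])]
        constructor
        · intro h; exact absurd h (by simp)
        · rintro ⟨_, hall⟩
          exact absurd hdvd (hall d le_rfl hdd)
      · rw [if_neg (by simp [PySem.Int.mod_eq_zero_iff_dvd, hdvd])]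
        rw [ih k (d + 1) (by omega) (by omega)]
        constructor
        · rintro ⟨hk, hall⟩
          refine ⟨hk, ?_⟩
          intro e he hee
          rcases eq_or_lt_of_le he with rfl | hlt
          · exact hdvd
          · exact hall e (by omega) hee
        · rintro ⟨hk, hall⟩
          exact ⟨hk, fun e he hee => hall e (by omega) hee⟩
    · rw [tdLoop, dif_neg hdd]
      simp only [decide_eq_true_eq]
      constructor
      · intro hk
        refine ⟨hk, ?_⟩
        intro e he hee
        exfalso
        nlinarith
      · rintro ⟨hk, _⟩; exact hk

lemma tdLoop_prime (k : Int) (hk : 2 ≤ k) : tdLoop k 2 = decide (Nat.Prime k.toNat) := by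
  rw [Bool.eq_iff_iff, decide_eq_true_eq,
    tdLoop_iff (k - 1).toNat k 2 le_rfl (by omega)]
  have hcast : ((k.toNat : Nat) : Int) = k := by omega
  constructor
  · rintro ⟨_, hall⟩
    by_contra hP
    have hpf : Nat.Prime (Nat.minFac k.toNat) := Nat.minFac_prime (by omega)
    have hdvd : Nat.minFac k.toNat ∣ k.toNat := Nat.minFac_dvd k.toNat
    have hsq : Nat.minFac k.toNat * Nat.minFac k.toNat ≤ k.toNat := by
      have := Nat.minFac_sq_le_self (n := k.toNat) (by omega) hP
      nlinarith [this]
    refine hall ((Nat.minFac k.toNat : Nat) : Int) (by exact_mod_cast hpf.two_le) ?_ ?_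
    · rw [show ((Nat.minFac k.toNat : Nat) : Int) * ((Nat.minFac k.toNat : Nat) : Int)
          = ((Nat.minFac k.toNat * Nat.minFac k.toNat : Nat) : Int) by push_cast; ring]
      omega
    · rw [← hcast]
      exact_mod_cast hdvd
  · intro hP
    refine ⟨hk, ?_⟩
    intro e he hee hdvd
    have hedvd : e.toNat ∣ k.toNat := by
      have : e ∣ ((k.toNat : Nat) : Int) := hcast ▸ hdvd
      rw [show e = ((e.toNat : Nat) : Int) by omega] at this
      exact_mod_cast this
    rcases (Nat.Prime.eq_one_or_self_of_dvd hP e.toNat hedvd) with h1 | h1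
    · omega
    · have : e = k := by omega
      subst this
      nlinarith

lemma count_fold (p : Int → Bool) (l : List Int) : ∀ (a : Int),
    l.foldl (fun acc k => if p k then acc + 1 else acc) a = a + (l.countP p : Int) := by
  induction l with
  | nil => intro a; simp
  | cons x l ih =>
    intro a
    rw [List.foldl_cons, ih, List.countP_cons]
    by_cases h : p x <;> simp [h] <;> ring

lemma solution_alt_eq (n : Int) (hn : 2 ≤ n) : solution_alt n = countA (n + 1).toNat := by
  unfold solution_alt
  rw [count_fold, PySem.List.pyRange_one, List.countP_map, zero_add]
  have hm : (n + 1 - 2).toNat = (n - 1).toNat := by omega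
  rw [hm]
  have hsplit : (n + 1).toNat = 2 + (n - 1).toNat := by omega
  unfold countA
  rw [hsplit, List.range_add, List.countP_append, List.countP_map]
  have h2 : (List.range 2).countP (fun k => decide (Nat.Prime k)) = 0 := by decide
  rw [h2]
  push_cast
  rw [zero_add]
  congr 1
  apply List.countP_congr
  intro k _
  simp only [Function.comp]
  rw [tdLoop_prime (2 + (k : Int)) (by omega),
    show ((2 : Int) + (k : Nat)).toNat = 2 + k by omega]

-- ===== VERDICT (by name: the statement is the Claim_ definition above) =====
theorem solution_spec : Claim_equal_solution := by
  intro n _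
  unfold Spec_solution
  by_cases hn : 2 ≤ n
  · rw [solution_eq n hn, solution_alt_eq n hn]
  · have h1 : solution n = 0 := by
      simp only [solution]
      rw [PySem.List.pyRange_one_eq_nil (by omega)]
      rfl
    have h2 : solution_alt n = 0 := by
      simp only [solution_alt]
      rw [PySem.List.pyRange_one_eq_nil (by omega)]
      rfl
    rw [h1, h2]
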